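-- pv_equiv track=rewrite | github.com/bisminth-netizen/Final_Project_AI_G8 | step3_rag.py | truncate_conversation
-- ===== SOURCE A (Python) =====
-- MAX_CONVERSATION_TURNS = 10   # Max turns kept in conversation history
--
-- MAX_CONVERSATION_CHARS = 6000 # Max total chars across all kept turns
--
-- def truncate_conversation(
--     conversation: list[dict],
--     max_turns: int = MAX_CONVERSATION_TURNS,
--     max_chars: int = MAX_CONVERSATION_CHARS,
-- ) -> list[dict]:
--     """
--     Trim a conversation history list so it fits within token-budget limits.
--
--     Strategy:
--       - A leading system message (role == "system") is always preserved.
--       - Of the remaining turns, the most recent `max_turns` are kept.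
--       - If the total character count still exceeds `max_chars`, the oldest
--         non-system turns are dropped one-by-one until it fits.
--
--     Each item in `conversation` must be a dict with at least a "role" key
--     and a "content" key (both strings).
--
--     Returns a new list (the original is not mutated).
--     """
--     if not conversation:
--         return []
--
--     system_msgs = [m for m in conversation if m.get("role") == "system"]
--     other_msgs  = [m for m in conversation if m.get("role") != "system"]
--
--     # Keep only the most recent turns
--     trimmed = other_msgs[-max_turns:]
--
--     # Drop oldest turns until total chars fit
--     def _total_chars(msgs: list[dict]) -> int:
--         return sum(len(m.get("content", "")) for m in msgs)
--
--     while trimmed and _total_chars(system_msgs + trimmed) > max_chars: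
--         trimmed.pop(0)
--
--     return system_msgs + trimmed
-- ===== SOURCE B (Python) =====
-- MAX_CONVERSATION_TURNS = 10
-- MAX_CONVERSATION_CHARS = 6000
--
-- def truncate_conversation(
--     conversation: list,
--     max_turns: int = MAX_CONVERSATION_TURNS,
--     max_chars: int = MAX_CONVERSATION_CHARS,
-- ) -> list:
--     # One pass to split; one precomputed total that is decremented while
--     # counting how many oldest turns to drop (no re-summing per drop).
--     system_msgs, other_msgs = [], []
--     for m in conversation:
--         (system_msgs if m.get("role") == "system" else other_msgs).append(m)
--     trimmed = other_msgs[-max_turns:]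
--     total = sum(len(m.get("content", "")) for m in system_msgs)
--     total += sum(len(m.get("content", "")) for m in trimmed)
--     k = 0
--     for m in trimmed:
--         if total <= max_chars:
--             break
--         total -= len(m.get("content", ""))
--         k += 1
--     return system_msgs + trimmed[k:]
-- ===== Notes on version B (the rewrite author's own statement) =====
-- stated objective: alternative
-- what changed: B splits the messages in one pass and replaces A's pop-and-resum loop (which re-sums all kept contents after every drop) by one precomputed total that is decremented while counting how many oldest turns to drop.
import Mathlib
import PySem

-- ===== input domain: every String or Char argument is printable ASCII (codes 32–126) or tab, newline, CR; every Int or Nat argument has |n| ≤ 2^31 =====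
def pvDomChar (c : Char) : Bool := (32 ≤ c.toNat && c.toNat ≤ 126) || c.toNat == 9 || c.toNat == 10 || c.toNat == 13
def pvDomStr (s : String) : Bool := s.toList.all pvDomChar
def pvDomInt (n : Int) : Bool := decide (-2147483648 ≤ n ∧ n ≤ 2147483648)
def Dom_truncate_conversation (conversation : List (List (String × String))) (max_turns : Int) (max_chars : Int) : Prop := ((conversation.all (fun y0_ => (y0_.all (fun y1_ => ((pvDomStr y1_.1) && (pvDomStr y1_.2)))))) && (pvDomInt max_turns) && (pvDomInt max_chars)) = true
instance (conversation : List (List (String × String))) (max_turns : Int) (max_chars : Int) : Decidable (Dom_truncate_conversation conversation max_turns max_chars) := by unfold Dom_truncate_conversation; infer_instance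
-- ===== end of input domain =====

-- B replaces A's pop-and-resum truncation loop by a one-pass split and a
-- decremented precomputed total; return value identical on all inputs.

-- shared dict primitives (m.get(...))
def pvRoleIsSystem (m : List (String × String)) : Bool :=
  (PySem.Dict.mk m).get? "role" == some "system"
def pvClen (m : List (String × String)) : Int :=
  PySem.Str.len ((PySem.Dict.mk m).getD "content" "")

-- ===== PORT A =====
-- sum(len(m.get("content", "")) for m in msgs)
def pvTotalChars (msgs : List (List (String × String))) : Int :=
  msgs.foldl (fun acc m => acc + pvClen m) 0

-- while trimmed and _total_chars(system_msgs + trimmed) > max_chars: trimmed.pop(0)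
def pvDropLoopA (sys : List (List (String × String))) (max_chars : Int) :
    List (List (String × String)) → List (List (String × String))
  | [] => []
  | m :: rest =>
    if pvTotalChars (sys ++ (m :: rest)) > max_chars then pvDropLoopA sys max_chars rest
    else m :: rest

def truncate_conversation (conversation : List (List (String × String))) (max_turns : Int) (max_chars : Int) : List (List (String × String)) :=
  if conversation = [] then []
  else
    let system_msgs := conversation.filter (fun m => pvRoleIsSystem m)
    let other_msgs := conversation.filter (fun m => !pvRoleIsSystem m)
    let trimmed := PySem.List.slice other_msgs (some (-max_turns)) none
    system_msgs ++ pvDropLoopA system_msgs max_chars trimmed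

-- ===== PORT B =====
-- single pass appending each message to the system or the other list
def pvSplitB (conversation : List (List (String × String))) :
    List (List (String × String)) × List (List (String × String)) :=
  conversation.foldl
    (fun p m => if pvRoleIsSystem m then (p.1 ++ [m], p.2) else (p.1, p.2 ++ [m]))
    ([], [])

-- the drop-count loop: total is decremented, never re-summed
def pvDropLoopB (max_chars : Int) (total : Int) :
    List (List (String × String)) → List (List (String × String))
  | [] => []
  | m :: rest =>
    if total ≤ max_chars then m :: rest
    else pvDropLoopB max_chars (total - pvClen m) rest

def truncate_conversation_alt (conversation : List (List (String × String))) (max_turns : Int) (max_chars : Int) : List (List (String × String)) :=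
  let p := pvSplitB conversation
  let trimmed := PySem.List.slice p.2 (some (-max_turns)) none
  let total := pvTotalChars p.1 + pvTotalChars trimmed
  p.1 ++ pvDropLoopB max_chars total trimmed

-- ===== PRECONDITION & SPEC =====
def Spec_truncate_conversation (conversation : List (List (String × String))) (max_turns : Int) (max_chars : Int) (out : List (List (String × String))) : Prop := out = truncate_conversation_alt conversation max_turns max_chars
instance (conversation : List (List (String × String))) (max_turns : Int) (max_chars : Int) (out : List (List (String × String))) : Decidable (Spec_truncate_conversation conversation max_turns max_chars out) := by unfold Spec_truncate_conversation; infer_instance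

-- ===== CLAIM (what is proved, stated in full; the proofs are below) =====
def Claim_equal_truncate_conversation : Prop := ∀ (conversation : List (List (String × String))) (max_turns : Int) (max_chars : Int), Dom_truncate_conversation conversation max_turns max_chars → Spec_truncate_conversation conversation max_turns max_chars (truncate_conversation conversation max_turns max_chars)

-- ===== LEMMAS AND PROOFS =====

theorem pvTotalChars_eq_sum (l : List (List (String × String))) :
    pvTotalChars l = (l.map pvClen).sum := by
  simpa using PySem.List.foldl_add l pvClen 0

theorem pvTotalChars_cons (m : List (String × String)) (l : List (List (String × String))) :
    pvTotalChars (m :: l) = pvClen m + pvTotalChars l := by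
  simp [pvTotalChars_eq_sum]

theorem pvTotalChars_append (a b : List (List (String × String))) :
    pvTotalChars (a ++ b) = pvTotalChars a + pvTotalChars b := by
  simp [pvTotalChars_eq_sum]

theorem pvSplitB_go (l : List (List (String × String))) (s o : List (List (String × String))) :
    l.foldl (fun p m => if pvRoleIsSystem m then (p.1 ++ [m], p.2) else (p.1, p.2 ++ [m])) (s, o)
      = (s ++ l.filter (fun m => pvRoleIsSystem m), o ++ l.filter (fun m => !pvRoleIsSystem m)) := by
  induction l generalizing s o with
  | nil => simp
  | cons m t ih =>
    by_cases h : pvRoleIsSystem m <;> simp [h, ih]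

theorem pvSplitB_eq (conversation : List (List (String × String))) :
    pvSplitB conversation =
      (conversation.filter (fun m => pvRoleIsSystem m),
       conversation.filter (fun m => !pvRoleIsSystem m)) := by
  simpa [pvSplitB] using pvSplitB_go conversation [] []

theorem pvDropLoop_eq (sys : List (List (String × String))) (max_chars : Int)
    (trimmed : List (List (String × String))) :
    pvDropLoopA sys max_chars trimmed
      = pvDropLoopB max_chars (pvTotalChars sys + pvTotalChars trimmed) trimmed := by
  induction trimmed with
  | nil => simp [pvDropLoopA, pvDropLoopB]
  | cons m rest ih =>
    simp only [pvDropLoopA, pvDropLoopB, pvTotalChars_append, pvTotalChars_cons]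
    by_cases h : pvTotalChars sys + (pvClen m + pvTotalChars rest) > max_chars
    · rw [if_pos h, if_neg (by omega), ih]
      congr 1
      ring
    · rw [if_neg h, if_pos (by omega)]

theorem truncate_empty_alt : truncate_conversation_alt [] max_turns max_chars = [] := by
  simp [truncate_conversation_alt, pvSplitB, PySem.List.slice, pvDropLoopB]

-- ===== VERDICT (by name: the statement is the Claim_ definition above) =====
theorem truncate_conversation_spec : Claim_equal_truncate_conversation := by
  intro conversation max_turns max_chars _
  show truncate_conversation conversation max_turns max_chars
      = truncate_conversation_alt conversation max_turns max_chars
  by_cases hc : conversation = []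
  · subst hc
    simp [truncate_conversation, truncate_empty_alt]
  · simp only [truncate_conversation, if_neg hc, truncate_conversation_alt, pvSplitB_eq]
    rw [pvDropLoop_eq]
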